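-- pv_equiv track=rewrite | github.com/calico-team/calsuco-22 | managers/solutions/managers_branch_exclusion.py | solve
-- ===== SOURCE A (Python) =====
-- from typing import List
--
-- def solve(N: int, M: List[int]) -> int:
--     subordinates = [[] for _ in range(N)]
--     for i in range(1, N):
--         subordinates[M[i]].append(i)
--
--     branch_sizes = [None for _ in range(N)]
--     def find_branch_size_dfs(id):
--         branch_sizes[id] = 1
--         for sub in subordinates[id]:
--             branch_sizes[id] += find_branch_size_dfs(sub)
--         return branch_sizes[id]
--     find_branch_size_dfs(0)
--
--     def disputes_resolved_by(id):
--         self_disputes = branch_sizes[id] - 1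
--
--         sum_branch_sizes = 0
--         for sub in subordinates[id]:
--             sum_branch_sizes += branch_sizes[sub]
--         cross_branch_disputes = 0
--         for sub in subordinates[id]:
--             cross_branch_disputes += branch_sizes[sub] * (sum_branch_sizes - branch_sizes[sub])
--         cross_branch_disputes //= 2
--
--         return self_disputes + cross_branch_disputes
--
--     best = 0
--     for i in range(N):
--         best = max(best, disputes_resolved_by(i))
--     return best
-- ===== SOURCE B (Python) =====
-- from typing import List
--
--
-- def solve(N: int, M: List[int]) -> int:
--     children = [[] for _ in range(N)]
--     for i in range(1, N):
--         children[M[i]].append(i)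
--
--     # Subtree sizes by bottom-up fixpoint iteration instead of recursion:
--     # repeatedly recompute size[v] = 1 + sum of children's sizes until stable
--     # (a valid tree stabilises within N - 1 rounds).
--     sizes = [1] * N
--     while True:
--         new = [1 + sum(sizes[c] for c in children[v]) for v in range(N)]
--         if new == sizes:
--             break
--         sizes = new
--
--     # One fused scan per node: running pairwise accumulation, no division.
--     def resolved(v):
--         r = sizes[v] - 1
--         seen = 0
--         for c in children[v]:
--             r += seen * sizes[c]
--             seen += sizes[c]
--         return r
--
--     return max(resolved(v) for v in range(N))
-- ===== Notes on version B (the rewrite author's own statement) =====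
-- stated objective: alternative
-- what changed: Replaces the memoised recursive DFS for subtree sizes by an iterative bottom-up fixpoint (relax size[v] = 1 + sum of children's sizes until stable, no recursion/call stack), and replaces each node's two scans plus floor division by one fused running-sum scan with no division, maximised by a single max() over a generator.
import Mathlib
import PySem

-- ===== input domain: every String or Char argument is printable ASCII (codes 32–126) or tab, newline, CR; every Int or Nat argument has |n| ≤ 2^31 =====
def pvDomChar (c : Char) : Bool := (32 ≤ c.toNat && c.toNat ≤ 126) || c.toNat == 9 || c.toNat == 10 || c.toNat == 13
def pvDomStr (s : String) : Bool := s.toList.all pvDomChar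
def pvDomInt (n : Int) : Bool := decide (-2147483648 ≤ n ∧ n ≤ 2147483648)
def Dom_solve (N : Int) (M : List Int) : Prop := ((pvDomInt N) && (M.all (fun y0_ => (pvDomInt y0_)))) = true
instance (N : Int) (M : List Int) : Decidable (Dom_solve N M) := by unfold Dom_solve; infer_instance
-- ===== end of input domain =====

-- B replaces A's recursive memoised DFS by an iterative bottom-up fixpoint and fuses each
-- node's two scans + floor division into one running-sum scan (objective: alternative).

-- ===== PORT A =====
-- shared first loop of both Pythons: subordinates[M[i]].append(i) for i in range(1, N)
-- (a negative parent index wraps from the end, as Python list indexing does; an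
-- out-of-range parent raises IndexError in Python and is excluded by Pre_solve,
-- the no-op of List.modify there only totalises the port)
def childLists (N : Int) (M : List Int) : List (List Int) :=
  (PySem.List.pyRange 1 N 1).foldl
    (fun subs i =>
      match PySem.List.pyGet? M i with
      | some p => subs.modify (if p < 0 then p + N else p).toNat (fun l => l ++ [i])
      | none => subs)
    (List.replicate N.toNat [])

def childrenAt (ch : List (List Int)) (v : Int) : List Int :=
  (PySem.List.pyGet? ch v).getD []

-- find_branch_size_dfs; A's write-once branch_sizes table is ported as the pure size
-- recursion it tabulates; the fuel N-1 only totalises it (never exhausted on Pre_solve,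
-- where the tree height is at most N-1)
def branchSize (ch : List (List Int)) : Nat → Int → Int
  | 0, _ => 1
  | f + 1, id =>
    (childrenAt ch id).foldl (fun acc sub => acc + branchSize ch f sub) 1

-- disputes_resolved_by
def disputesResolvedBy (ch : List (List Int)) (f : Nat) (id : Int) : Int :=
  let selfDisputes := branchSize ch f id - 1
  let sumBranchSizes := (childrenAt ch id).foldl (fun s sub => s + branchSize ch f sub) 0
  let cross := (childrenAt ch id).foldl
    (fun s sub => s + branchSize ch f sub * (sumBranchSizes - branchSize ch f sub)) 0
  selfDisputes + PySem.Int.floordiv cross 2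

def solve (N : Int) (M : List Int) : Int :=
  let ch := childLists N M
  (PySem.List.pyRange 0 N 1).foldl
    (fun best i => max best (disputesResolvedBy ch (N - 1).toNat i)) 0

-- ===== PORT B =====
-- one relaxation round: sizes = [1 + sum(sizes[c] for c in children[v]) for v in range(N)]
def stepSizes (N : Int) (ch : List (List Int)) (sizes : List Int) : List Int :=
  (PySem.List.pyRange 0 N 1).map
    (fun v => 1 + (childrenAt ch v).foldl (fun s c => s + PySem.List.pyGetD sizes c 0) 0)

-- the 'while True: new = step(sizes); if new == sizes: break; sizes = new' loop;
-- the fuel N-1 only totalises it: whenever the Python loop terminates it is stable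
-- by round N-1, so the port returns the same fixpoint
def iterSizes (N : Int) (ch : List (List Int)) : Nat → List Int → List Int
  | 0, s => s
  | t + 1, s =>
    let n := stepSizes N ch s
    if n = s then s else iterSizes N ch t n

-- resolved(v): one fused scan with a running sum of already-seen branch sizes
def resolvedAt (sizes : List Int) (ch : List (List Int)) (v : Int) : Int :=
  ((childrenAt ch v).foldl
    (fun (p : Int × Int) c =>
      let sc := PySem.List.pyGetD sizes c 0
      (p.1 + p.2 * sc, p.2 + sc))
    (PySem.List.pyGetD sizes v 0 - 1, 0)).1

-- max(resolved(v) for v in range(N)); Python's max of an empty generator raises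
-- ValueError (N ≤ 0, excluded by Pre_solve), where the port returns the default 0
def solve_alt (N : Int) (M : List Int) : Int :=
  let ch := childLists N M
  let sizes := iterSizes N ch (N - 1).toNat (List.replicate N.toNat 1)
  match PySem.List.max? ((PySem.List.pyRange 0 N 1).map (resolvedAt sizes ch)) (fun y => y) with
  | some m => m
  | none => 0

-- ===== PRECONDITION & SPEC =====
-- one step up the chain of command (0 is absorbing); used only to state reachability
def parStep (N : Int) (M : List Int) (j : Int) : Int :=
  if j = 0 then 0
  else
    match PySem.List.pyGet? M j with
    | some p => if p < 0 then p + N else p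
    | none => j

-- Exactly the inputs on which Python A returns: N ≥ 1, M covers indices 1..N-1, every
-- parent index is in Python range [-N, N), and every node's chain of (wrapped) parents
-- reaches manager 0 (otherwise A hits an IndexError, a TypeError on a None entry, or
-- unbounded recursion). A chain that reaches 0 does so within N-1 steps.
def Pre_solve (N : Int) (M : List Int) : Prop :=
  1 ≤ N ∧ N ≤ (M.length : Int) ∧
  (∀ i ∈ PySem.List.pyRange 1 N 1,
    -N ≤ (PySem.List.pyGet? M i).getD 0 ∧ (PySem.List.pyGet? M i).getD 0 < N) ∧
  (∀ i ∈ PySem.List.pyRange 1 N 1, (parStep N M)^[(N - 1).toNat] i = 0)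

instance (N : Int) (M : List Int) : Decidable (Pre_solve N M) := by
  unfold Pre_solve; infer_instance

def pvWitness_solve : Int × List Int := (3, [0, 0, 0])

def Spec_solve (N : Int) (M : List Int) (out : Int) : Prop := out = solve_alt N M
instance (N : Int) (M : List Int) (out : Int) : Decidable (Spec_solve N M out) := by
  unfold Spec_solve; infer_instance

-- ===== CLAIM (what is proved, stated in full; the proofs are below) =====
def Claim_equal_solve : Prop :=
  ∀ (N : Int) (M : List Int), Dom_solve N M → Pre_solve N M → Spec_solve N M (solve N M)

-- ===== LEMMAS AND PROOFS =====

theorem pv_mem_modify {α : Type} (f : α → α) :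
    ∀ (l : List α) (k : Nat) (x : α), x ∈ l.modify k f → x ∈ l ∨ ∃ a ∈ l, x = f a := by
  intro l k x hx
  rcases List.mem_iff_getElem.mp hx with ⟨j, hj, hxe⟩
  rw [List.getElem_modify] at hxe
  rw [List.length_modify] at hj
  split at hxe
  · exact Or.inr ⟨l[j], List.getElem_mem hj, hxe.symm⟩
  · exact Or.inl (hxe ▸ List.getElem_mem hj)

theorem pv_childLists_bound (N : Int) (M : List Int) :
    ∀ l ∈ childLists N M, ∀ c ∈ l, 1 ≤ c ∧ c < N := by
  have main :
      ∀ (xs : List Int) (subs : List (List Int)),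
        (∀ x ∈ xs, 1 ≤ x ∧ x < N) → (∀ l ∈ subs, ∀ c ∈ l, 1 ≤ c ∧ c < N) →
        ∀ l ∈ xs.foldl
            (fun subs i =>
              match PySem.List.pyGet? M i with
              | some p => subs.modify (if p < 0 then p + N else p).toNat (fun l => l ++ [i])
              | none => subs)
            subs, ∀ c ∈ l, 1 ≤ c ∧ c < N := by
    intro xs
    induction xs with
    | nil => intro subs _ hsubs; simpa using hsubs
    | cons x xs ih =>
      intro subs hxs hsubs
      simp only [List.foldl_cons]
      apply ih
      · intro y hy; exact hxs y (List.mem_cons_of_mem _ hy)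
      · intro l hl c hc
        cases hM : PySem.List.pyGet? M x with
        | none => simp only [hM] at hl; exact hsubs l hl c hc
        | some p =>
          simp only [hM] at hl
          rcases pv_mem_modify _ _ _ _ hl with h | ⟨a, ha, rfl⟩
          · exact hsubs l h c hc
          · rcases List.mem_append.mp hc with h | h
            · exact hsubs a ha c h
            · simp only [List.mem_singleton] at h
              exact h ▸ hxs x List.mem_cons_self
  intro l hl
  apply main (PySem.List.pyRange 1 N 1) _ _ _ l hl
  · intro x hx; exact (PySem.List.mem_pyRange_one).mp hx
  · intro l hl; simp only [List.mem_replicate] at hl; simp [hl.2]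

theorem pv_childrenAt_bound (N : Int) (M : List Int) (v : Int) :
    ∀ c ∈ childrenAt (childLists N M) v, 1 ≤ c ∧ c < N := by
  intro c hc
  unfold childrenAt at hc
  cases h : PySem.List.pyGet? (childLists N M) v with
  | none => simp [h] at hc
  | some l =>
    simp only [h, Option.getD_some] at hc
    exact pv_childLists_bound N M l (PySem.List.mem_of_pyGet?_eq_some _ h) c hc

theorem pv_iterSizes_eq (N : Int) (ch : List (List Int)) :
    ∀ (t : Nat) (s : List Int), iterSizes N ch t s = (stepSizes N ch)^[t] s := by
  intro t
  induction t with
  | zero => intro s; rfl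
  | succ t ih =>
    intro s
    rw [Function.iterate_succ_apply]
    by_cases h : stepSizes N ch s = s
    · simp [iterSizes, h, Function.iterate_fixed h t]
    · simp [iterSizes, h, ih]

theorem pv_step_get (N : Int) (ch : List (List Int)) (sizes : List Int) (v : Int)
    (h0 : 0 ≤ v) (h1 : v < N) :
    PySem.List.pyGetD (stepSizes N ch sizes) v 0
      = 1 + (childrenAt ch v).foldl (fun s c => s + PySem.List.pyGetD sizes c 0) 0 := by
  unfold stepSizes
  exact PySem.List.pyGetD_map_pyRange_of_nonneg _ _ _ _ h0 h1

theorem pv_sizes_eq (N : Int) (M : List Int) :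
    ∀ (t : Nat) (v : Int), 0 ≤ v → v < N →
      PySem.List.pyGetD ((stepSizes N (childLists N M))^[t] (List.replicate N.toNat 1)) v 0
        = branchSize (childLists N M) t v := by
  intro t
  induction t with
  | zero =>
    intro v h0 h1
    rw [Function.iterate_zero, id]
    rw [PySem.List.pyGetD_eq_getElem _ _ h0 (by simpa using by omega)]
    simp [branchSize]
  | succ t ih =>
    intro v h0 h1
    rw [Function.iterate_succ_apply', pv_step_get N _ _ v h0 h1]
    rw [PySem.List.foldl_congr_mem _ _
        (fun s c => s + branchSize (childLists N M) t c) 0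
        (by
          intro acc c hc
          have hb := pv_childrenAt_bound N M v c hc
          simp only
          rw [ih c (by omega) hb.2])]
    rw [show branchSize (childLists N M) (t + 1) v =
        (childrenAt (childLists N M) v).foldl
          (fun acc sub => acc + branchSize (childLists N M) t sub) 1 from rfl]
    rw [PySem.List.foldl_add, PySem.List.foldl_add]
    omega

-- B's fused pair fold, as a closed form: twice the accumulated cross count
theorem pv_pairfold (ys : List Int) :
    ∀ (r0 s0 : Int),
      2 * (ys.foldl (fun (p : Int × Int) y => (p.1 + p.2 * y, p.2 + y)) (r0, s0)).1
        = 2 * r0 + (s0 + ys.sum) * (s0 + ys.sum) - s0 * s0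
          - (ys.map (fun y => y * y)).sum := by
  induction ys with
  | nil =>
    intro r0 s0
    simp only [List.foldl_nil, List.sum_nil, List.map_nil]
    ring
  | cons y ys ih =>
    intro r0 s0
    simp only [List.foldl_cons, List.sum_cons, List.map_cons]
    rw [ih (r0 + s0 * y) (s0 + y)]
    ring

theorem pv_sum_cross (ys : List Int) (S : Int) :
    (ys.map (fun y => y * (S - y))).sum = S * ys.sum - (ys.map (fun y => y * y)).sum := by
  induction ys with
  | nil => simp
  | cons y ys ih => simp only [List.map_cons, List.sum_cons, ih]; ring

-- per-node equality: A's two scans plus floor division = B's fused running-sum scan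
theorem pv_node_eq (cs : List Int) (g : Int → Int) (sv : Int) :
    (sv - 1) + PySem.Int.floordiv
        (cs.foldl (fun s c => s + g c *
          ((cs.foldl (fun s c => s + g c) 0) - g c)) 0) 2
      = (cs.foldl (fun (p : Int × Int) c => (p.1 + p.2 * g c, p.2 + g c)) (sv - 1, 0)).1 := by
  have hsum : cs.foldl (fun s c => s + g c) 0 = (cs.map g).sum := by
    rw [PySem.List.foldl_add]; simp
  have hcross :
      cs.foldl (fun s c => s + g c * ((cs.foldl (fun s c => s + g c) 0) - g c)) 0
        = (cs.map g).sum * (cs.map g).sum - ((cs.map g).map (fun y => y * y)).sum := by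
    rw [PySem.List.foldl_add]
    rw [show (cs.map fun c => g c * (cs.foldl (fun s c => s + g c) 0 - g c))
        = (cs.map g).map (fun y => y * (cs.foldl (fun s c => s + g c) 0 - y)) by
      rw [List.map_map]
      rfl]
    rw [pv_sum_cross, hsum]
    ring
  have hpair := pv_pairfold (cs.map g) (sv - 1) 0
  rw [List.foldl_map] at hpair
  have hp2 : 2 * (cs.foldl (fun (p : Int × Int) c => (p.1 + p.2 * g c, p.2 + g c)) (sv - 1, 0)).1
      = 2 * (sv - 1) + (cs.map g).sum * (cs.map g).sum
        - ((cs.map g).map (fun y => y * y)).sum := by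
    linear_combination hpair
  have h2 : (cs.map g).sum * (cs.map g).sum - ((cs.map g).map (fun y => y * y)).sum
      = 2 * ((cs.foldl (fun (p : Int × Int) c => (p.1 + p.2 * g c, p.2 + g c)) (sv - 1, 0)).1
          - (sv - 1)) := by linarith
  rw [hcross, PySem.Int.floordiv_eq_ediv_of_pos (by norm_num), h2,
    Int.mul_ediv_cancel_left _ (by norm_num : (2:Int) ≠ 0)]
  ring


theorem pv_branchSize_pos (ch : List (List Int)) :
    ∀ (f : Nat) (v : Int), 1 ≤ branchSize ch f v := by
  intro f
  induction f with
  | zero => intro v; simp [branchSize]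
  | succ f ih =>
    intro v
    show 1 ≤ (childrenAt ch v).foldl (fun acc sub => acc + branchSize ch f sub) 1
    rw [PySem.List.foldl_add]
    have : 0 ≤ ((childrenAt ch v).map (branchSize ch f)).sum := by
      apply List.sum_nonneg
      intro x hx
      rcases List.mem_map.mp hx with ⟨c, _, rfl⟩
      exact le_trans (by norm_num) (ih c)
    omega

theorem pv_pairfold_ge (g : Int → Int) :
    ∀ (cs : List Int) (r0 s0 : Int), 0 ≤ s0 → (∀ c ∈ cs, 0 ≤ g c) →
      r0 ≤ (cs.foldl (fun (p : Int × Int) c => (p.1 + p.2 * g c, p.2 + g c)) (r0, s0)).1 := by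
  intro cs
  induction cs with
  | nil => intro r0 s0 _ _; simp
  | cons c cs ih =>
    intro r0 s0 hs0 hcs
    simp only [List.foldl_cons]
    have h1 : 0 ≤ g c := hcs c List.mem_cons_self
    calc r0 ≤ r0 + s0 * g c := by nlinarith
      _ ≤ _ := ih (r0 + s0 * g c) (s0 + g c) (by omega)
            (fun x hx => hcs x (List.mem_cons_of_mem _ hx))

-- ===== VERDICT (by name: the statement is the Claim_ definition above) =====
theorem solve_spec : Claim_equal_solve := by
  intro N M _ hpre
  unfold Spec_solve solve solve_alt
  dsimp only
  rw [pv_iterSizes_eq]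
  have hN : (0 : Int) < N := by have := hpre.1; omega
  -- abbreviations (proof-local)
  set ch := childLists N M with hch
  set bs := branchSize ch (N - 1).toNat with hbs
  have hnode : ∀ i : Int, 0 ≤ i → i < N →
      resolvedAt ((stepSizes N ch)^[(N - 1).toNat] (List.replicate N.toNat 1)) ch i
        = ((childrenAt ch i).foldl
            (fun (p : Int × Int) c => (p.1 + p.2 * bs c, p.2 + bs c)) (bs i - 1, 0)).1 := by
    intro i h0 h1
    unfold resolvedAt
    rw [pv_sizes_eq N M _ i h0 h1]
    rw [PySem.List.foldl_congr_mem _ _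
        (fun (p : Int × Int) c => (p.1 + p.2 * bs c, p.2 + bs c)) _
        (by
          intro acc c hc
          have hb := pv_childrenAt_bound N M i c hc
          simp only
          rw [pv_sizes_eq N M _ c (by omega) hb.2])]
  have hA : ∀ i : Int, 0 ≤ i → i < N →
      disputesResolvedBy ch (N - 1).toNat i
        = ((childrenAt ch i).foldl
            (fun (p : Int × Int) c => (p.1 + p.2 * bs c, p.2 + bs c)) (bs i - 1, 0)).1 :=
    fun i _ _ => pv_node_eq (childrenAt ch i) bs (bs i)
  -- node values are nonnegative (a subtree has size ≥ 1)
  have hpos : ∀ i : Int, 0 ≤ ((childrenAt ch i).foldl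
      (fun (p : Int × Int) c => (p.1 + p.2 * bs c, p.2 + bs c)) (bs i - 1, 0)).1 := by
    intro i
    have h1 : 1 ≤ bs i := pv_branchSize_pos ch (N - 1).toNat i
    calc (0 : Int) ≤ bs i - 1 := by omega
      _ ≤ _ := pv_pairfold_ge bs (childrenAt ch i) (bs i - 1) 0 le_rfl
            (fun c _ => le_trans (by norm_num) (pv_branchSize_pos ch (N - 1).toNat c))
  -- split off node 0 and reduce both sides to a running max over the same list
  rw [PySem.List.pyRange_one_cons hN]
  rw [List.map_cons]
  have hmap : (PySem.List.pyRange (0 + 1) N 1).map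
      (resolvedAt ((stepSizes N ch)^[(N - 1).toNat] (List.replicate N.toNat 1)) ch)
        = (PySem.List.pyRange (0 + 1) N 1).map
            (fun i => ((childrenAt ch i).foldl
              (fun (p : Int × Int) c => (p.1 + p.2 * bs c, p.2 + bs c)) (bs i - 1, 0)).1) := by
    apply List.map_congr_left
    intro i hi
    have hi' := PySem.List.mem_pyRange_one.mp hi
    exact hnode i (by omega) hi'.2
  rw [hnode 0 le_rfl hN, hmap, PySem.List.max?_id_cons]
  simp only [List.foldl_cons]
  rw [PySem.List.foldl_congr_mem _ _
      (fun b i => max b (((childrenAt ch i).foldl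
        (fun (p : Int × Int) c => (p.1 + p.2 * bs c, p.2 + bs c)) (bs i - 1, 0)).1)) _
      (by
        intro acc i hi
        have hi' := PySem.List.mem_pyRange_one.mp hi
        rw [hA i (by omega) hi'.2])]
  rw [hA 0 le_rfl hN, max_eq_right (hpos 0)]
  rw [← List.foldl_map
    (f := fun i => ((childrenAt ch i).foldl
      (fun (p : Int × Int) c => (p.1 + p.2 * bs c, p.2 + bs c)) (bs i - 1, 0)).1)
    (g := fun b v => max b v)]
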